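-- pv_equiv track=rewrite | github.com/khb7840/project-setup-scripts | generator/script_generator.py | update_script_info
-- ===== SOURCE A (Python) =====
-- def update_script_info(type, liblist, funclist, classlist, varlist):
--     if type == "python":
--         output = {
--             "libraries": "\n".join(
--                 [f"import {lib}" for lib in liblist]
--             ),
--             "function": "\n".join(
--                 [f'''def {func}():\n    pass''' for func in funclist]
--             ),
--             "class": "\n".join(
--                 [f'''class {cl}:\n    def __init__(self):\n        pass''' for cl in classlist]
--             ),
--             "variable": "\n".join(
--                 [f"{v} = None" for v in varlist]
--             )
--         }
--     elif type == "r":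
--         output = {
--             "libraries": "\n".join(
--                 [f"library({lib})" for lib in liblist]
--             ),
--             "function": "\n".join(
--                 [f'''{func} <- function() {{\n    return()\n}}''' for func in funclist]
--             ),
--             "class": "\n".join(
--                 [f'''{cl} <- list()''' for cl in classlist]
--             ),
--             "variable": "\n".join(
--                 [f'''{v} <- 0''' for v in varlist]
--             )
--         }
--     elif type == "go":
--         output = {
--             "libraries": "\n".join(
--                 ["import ("] + [f'''\t"{lib}"''' for lib in liblist] + [")"]
--             ),
--             "function": "\n".join(
--                 [f'''func {func}() {{\n\tlog.Println("Hello, World!")\n}}''' for func in funclist]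
--             ),
--             "class": "\n".join(
--                 [f'''type {cl} struct {{\n\t// strVar string\n\t// intVar int\n}}''' for cl in classlist]
--             ),
--             "variable": "\n".join(
--                 [f"{v} := nil" for v in varlist]
--             )
--         }
--
--     elif type == "typescript":
--         output = {
--             "libraries": "\n".join(
--                 [f'import * from "{lib}"' for lib in liblist]
--             ),
--             "function": "\n".join(
--                 [f'''function {func}() {{\n    console.log("Hello, world!")\n}}''' for func in funclist]),
--             "class": "\n".join(
--                 [f'''class {cl} {{\n    name: string\n}}''' for cl in classlist]),
--             "variable": "\n".join(
--                 [f"let {v} = null" for v in varlist]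
--             )
--         }
--     elif type == "javascript":
--         output = {
--             "libraries": "\n".join(
--                 [f'import * from "{lib}"' for lib in liblist]
--             ),
--             "function": "\n".join(
--                 [f'''function {func}() {{\n    console.log("Hello, world!")\n}}''' for func in funclist]
--             ),
--             "class": "\n".join(
--                 [f'''class {cl} {{\n    name: string\n}}''' for cl in classlist]
--             ),
--             "variable": "\n".join(
--                 [f"let {v} = null" for v in varlist]
--             )
--         }
--
--     return output
-- ===== SOURCE B (Python) =====
-- # Different decomposition: instead of building a list of formatted pieces and
-- # joining it, each category string is assembled back-to-front in ONE reverse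
-- # pass with an accumulator (no intermediate list, no str.join), driven by a
-- # per-language tuple of formatter lambdas; Go's import block is wrapped
-- # arithmetically around the accumulated entries.
--
-- def _cat(fmt, names):
--     out = None
--     for name in reversed(names):
--         p = fmt(name)
--         out = p if out is None else p + "\n" + out
--     return "" if out is None else out
--
--
-- FORMATTERS = {
--     "python": (
--         lambda l: f"import {l}",
--         lambda f: f"def {f}():\n    pass",
--         lambda c: f"class {c}:\n    def __init__(self):\n        pass",
--         lambda v: f"{v} = None",
--     ),
--     "r": (
--         lambda l: f"library({l})",
--         lambda f: f"{f} <- function() {{\n    return()\n}}",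
--         lambda c: f"{c} <- list()",
--         lambda v: f"{v} <- 0",
--     ),
--     "go": (
--         lambda l: f'\t"{l}"',
--         lambda f: f'func {f}() {{\n\tlog.Println("Hello, World!")\n}}',
--         lambda c: f"type {c} struct {{\n\t// strVar string\n\t// intVar int\n}}",
--         lambda v: f"{v} := nil",
--     ),
--     "typescript": (
--         lambda l: f'import * from "{l}"',
--         lambda f: f'function {f}() {{\n    console.log("Hello, world!")\n}}',
--         lambda c: f"class {c} {{\n    name: string\n}}",
--         lambda v: f"let {v} = null",
--     ),
--     "javascript": (
--         lambda l: f'import * from "{l}"',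
--         lambda f: f'function {f}() {{\n    console.log("Hello, world!")\n}}',
--         lambda c: f"class {c} {{\n    name: string\n}}",
--         lambda v: f"let {v} = null",
--     ),
-- }
--
--
-- def update_script_info(type, liblist, funclist, classlist, varlist):
--     libf, funf, clf, varf = FORMATTERS[type]
--     libs = _cat(libf, liblist)
--     if type == "go":
--         libs = "import (\n" + (libs + "\n" if liblist else "") + ")"
--     return {
--         "libraries": libs,
--         "function": _cat(funf, funclist),
--         "class": _cat(clf, classlist),
--         "variable": _cat(varf, varlist),
--     }
-- ===== Notes on version B (the rewrite author's own statement) =====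
-- stated objective: alternative
-- what changed: Each category string is now assembled back-to-front in a single reverse pass with a string accumulator (no intermediate list of pieces and no str.join), using per-language formatter lambdas looked up once, and Go's import wrapper is concatenated around the accumulated entries instead of being extra list elements; unknown types raise (KeyError in B, UnboundLocalError in A) and are outside Pre_.
import Mathlib
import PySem

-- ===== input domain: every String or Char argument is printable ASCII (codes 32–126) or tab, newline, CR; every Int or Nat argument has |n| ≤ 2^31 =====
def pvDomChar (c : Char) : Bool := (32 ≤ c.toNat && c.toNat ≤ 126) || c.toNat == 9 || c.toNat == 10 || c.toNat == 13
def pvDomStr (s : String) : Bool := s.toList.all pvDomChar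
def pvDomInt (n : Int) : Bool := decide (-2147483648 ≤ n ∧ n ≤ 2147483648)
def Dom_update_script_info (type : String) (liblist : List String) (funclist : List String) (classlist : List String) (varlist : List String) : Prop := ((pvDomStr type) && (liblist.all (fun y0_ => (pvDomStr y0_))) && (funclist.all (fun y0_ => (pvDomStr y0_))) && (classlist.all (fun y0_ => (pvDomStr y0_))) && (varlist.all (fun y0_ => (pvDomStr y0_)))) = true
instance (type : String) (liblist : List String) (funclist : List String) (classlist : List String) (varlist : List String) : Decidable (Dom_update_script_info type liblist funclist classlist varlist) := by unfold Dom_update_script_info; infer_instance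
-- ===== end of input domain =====

-- B assembles each category string back-to-front in one reverse pass with an accumulator
-- (no intermediate piece list, no join), from per-language formatter functions; objective: alternative.

-- ===== PORT A =====
-- Literal transliteration of A's if/elif chain; on an unrecognised type Python raises
-- UnboundLocalError, which Pre_ excludes (the port returns [] there, nothing is claimed).
def update_script_info (type : String) (liblist : List String) (funclist : List String) (classlist : List String) (varlist : List String) : List (String × String) :=
  if type == "python" then
    [("libraries", PySem.Str.join "\n" (liblist.map (fun lib => "import " ++ lib))),
     ("function", PySem.Str.join "\n" (funclist.map (fun func => "def " ++ func ++ "():\n    pass"))),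
     ("class", PySem.Str.join "\n" (classlist.map (fun cl => "class " ++ cl ++ ":\n    def __init__(self):\n        pass"))),
     ("variable", PySem.Str.join "\n" (varlist.map (fun v => v ++ " = None")))]
  else if type == "r" then
    [("libraries", PySem.Str.join "\n" (liblist.map (fun lib => "library(" ++ lib ++ ")"))),
     ("function", PySem.Str.join "\n" (funclist.map (fun func => func ++ " <- function() {\n    return()\n}"))),
     ("class", PySem.Str.join "\n" (classlist.map (fun cl => cl ++ " <- list()"))),
     ("variable", PySem.Str.join "\n" (varlist.map (fun v => v ++ " <- 0")))]
  else if type == "go" then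
    [("libraries", PySem.Str.join "\n" (["import ("] ++ liblist.map (fun lib => "\t\"" ++ lib ++ "\"") ++ [")"])),
     ("function", PySem.Str.join "\n" (funclist.map (fun func => "func " ++ func ++ "() {\n\tlog.Println(\"Hello, World!\")\n}"))),
     ("class", PySem.Str.join "\n" (classlist.map (fun cl => "type " ++ cl ++ " struct {\n\t// strVar string\n\t// intVar int\n}"))),
     ("variable", PySem.Str.join "\n" (varlist.map (fun v => v ++ " := nil")))]
  else if type == "typescript" then
    [("libraries", PySem.Str.join "\n" (liblist.map (fun lib => "import * from \"" ++ lib ++ "\""))),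
     ("function", PySem.Str.join "\n" (funclist.map (fun func => "function " ++ func ++ "() {\n    console.log(\"Hello, world!\")\n}"))),
     ("class", PySem.Str.join "\n" (classlist.map (fun cl => "class " ++ cl ++ " {\n    name: string\n}"))),
     ("variable", PySem.Str.join "\n" (varlist.map (fun v => "let " ++ v ++ " = null")))]
  else if type == "javascript" then
    [("libraries", PySem.Str.join "\n" (liblist.map (fun lib => "import * from \"" ++ lib ++ "\""))),
     ("function", PySem.Str.join "\n" (funclist.map (fun func => "function " ++ func ++ "() {\n    console.log(\"Hello, world!\")\n}"))),
     ("class", PySem.Str.join "\n" (classlist.map (fun cl => "class " ++ cl ++ " {\n    name: string\n}"))),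
     ("variable", PySem.Str.join "\n" (varlist.map (fun v => "let " ++ v ++ " = null")))]
  else []  -- Python: UnboundLocalError (outside Pre_)

-- ===== PORT B =====
-- Source B's _cat: one pass over reversed(names) with an Option accumulator, prepending
-- "piece \n rest" at each step; no intermediate list and no join.
def pvCat (fmt : String → String) (names : List String) : String :=
  (names.reverse.foldl
    (fun out name =>
      let p := fmt name
      match out with
      | none => some p
      | some o => some (p ++ "\n" ++ o))
    (none : Option String)).getD ""

-- Source B's FORMATTERS: per-language tuple of four formatter functions.
def pvFormatters : PySem.Dict String ((String → String) × (String → String) × (String → String) × (String → String)) :=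
  PySem.Dict.mk
    [("python", (fun l => "import " ++ l,
                 fun f => "def " ++ f ++ "():\n    pass",
                 fun c => "class " ++ c ++ ":\n    def __init__(self):\n        pass",
                 fun v => v ++ " = None")),
     ("r", (fun l => "library(" ++ l ++ ")",
            fun f => f ++ " <- function() {\n    return()\n}",
            fun c => c ++ " <- list()",
            fun v => v ++ " <- 0")),
     ("go", (fun l => "\t\"" ++ l ++ "\"",
             fun f => "func " ++ f ++ "() {\n\tlog.Println(\"Hello, World!\")\n}",
             fun c => "type " ++ c ++ " struct {\n\t// strVar string\n\t// intVar int\n}",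
             fun v => v ++ " := nil")),
     ("typescript", (fun l => "import * from \"" ++ l ++ "\"",
                     fun f => "function " ++ f ++ "() {\n    console.log(\"Hello, world!\")\n}",
                     fun c => "class " ++ c ++ " {\n    name: string\n}",
                     fun v => "let " ++ v ++ " = null")),
     ("javascript", (fun l => "import * from \"" ++ l ++ "\"",
                     fun f => "function " ++ f ++ "() {\n    console.log(\"Hello, world!\")\n}",
                     fun c => "class " ++ c ++ " {\n    name: string\n}",
                     fun v => "let " ++ v ++ " = null"))]

def update_script_info_alt (type : String) (liblist : List String) (funclist : List String) (classlist : List String) (varlist : List String) : List (String × String) :=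
  match pvFormatters.get? type with
  | none => []  -- Python: KeyError (outside Pre_)
  | some (libf, funf, clf, varf) =>
    let libs := pvCat libf liblist
    let libs := if type == "go" then
        "import (\n" ++ (if liblist.isEmpty then "" else libs ++ "\n") ++ ")"
      else libs
    [("libraries", libs),
     ("function", pvCat funf funclist),
     ("class", pvCat clf classlist),
     ("variable", pvCat varf varlist)]

-- ===== PRECONDITION & SPEC =====
-- Pre_ excludes unknown language names, on which Python A raises UnboundLocalError
-- (and Python B raises KeyError).
def Pre_update_script_info (type : String) (liblist : List String) (funclist : List String) (classlist : List String) (varlist : List String) : Prop :=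
  type = "python" ∨ type = "r" ∨ type = "go" ∨ type = "typescript" ∨ type = "javascript"
instance (type : String) (liblist : List String) (funclist : List String) (classlist : List String) (varlist : List String) : Decidable (Pre_update_script_info type liblist funclist classlist varlist) := by unfold Pre_update_script_info; infer_instance

def pvWitness_update_script_info : String × List String × List String × List String × List String :=
  ("python", ["os"], ["main"], ["Cfg"], ["x"])

def Spec_update_script_info (type : String) (liblist : List String) (funclist : List String) (classlist : List String) (varlist : List String) (out : List (String × String)) : Prop := out = update_script_info_alt type liblist funclist classlist varlist
instance (type : String) (liblist : List String) (funclist : List String) (classlist : List String) (varlist : List String) (out : List (String × String)) : Decidable (Spec_update_script_info type liblist funclist classlist varlist out) := by unfold Spec_update_script_info; infer_instance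

-- ===== CLAIM (what is proved, stated in full; the proofs are below) =====
def Claim_equal_update_script_info : Prop := ∀ (type : String) (liblist : List String) (funclist : List String) (classlist : List String) (varlist : List String), Dom_update_script_info type liblist funclist classlist varlist → Pre_update_script_info type liblist funclist classlist varlist → Spec_update_script_info type liblist funclist classlist varlist (update_script_info type liblist funclist classlist varlist)

-- ===== LEMMAS AND PROOFS =====

-- join over a two-or-more-element list peels its head.
theorem pv_join_cons2 (s x b : String) (bs : List String) :
    PySem.Str.join s (x :: b :: bs) = x ++ s ++ PySem.Str.join s (b :: bs) := by
  simp [PySem.Str.join, PySem.Chars.join_cons_cons, String.append_assoc]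

theorem pv_join_singleton (s x : String) : PySem.Str.join s [x] = x := by
  simp [PySem.Str.join, PySem.Chars.join_singleton]

-- B's backwards accumulator computes exactly "\n".join(names.map fmt).
theorem pvCat_foldr (fmt : String → String) (names : List String) (h : names ≠ []) :
    names.foldr
      (fun name out =>
        match out with
        | none => some (fmt name)
        | some o => some (fmt name ++ "\n" ++ o)) none
      = some (PySem.Str.join "\n" (names.map fmt)) := by
  induction names with
  | nil => exact absurd rfl h
  | cons x xs ih =>
    cases xs with
    | nil => simp [pv_join_singleton]
    | cons y ys =>
      simp only [List.foldr_cons] at ih ⊢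
      rw [ih (by simp)]
      simp [List.map, pv_join_cons2]

theorem pvCat_eq (fmt : String → String) (names : List String) :
    pvCat fmt names = PySem.Str.join "\n" (names.map fmt) := by
  unfold pvCat
  rw [List.foldl_reverse]
  cases h : names with
  | nil => simp [PySem.Str.join, PySem.Chars.join_nil]
  | cons x xs =>
    rw [← h, pvCat_foldr fmt names (by simp [h])]
    rfl

-- Go's import block: join over "import (" :: entries ++ [")"] equals the wrapped form.
theorem pv_join_close (L : List String) :
    PySem.Str.join "\n" (L ++ [")"]) =
      (if L.isEmpty then "" else PySem.Str.join "\n" L ++ "\n") ++ ")" := by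
  induction L with
  | nil => simp [pv_join_singleton]
  | cons x xs ih =>
    cases xs with
    | nil => simp [pv_join_cons2, pv_join_singleton, String.append_assoc]
    | cons y ys =>
      simp only [List.cons_append, pv_join_cons2] at ih ⊢
      rw [ih]
      simp [String.append_assoc]

theorem pv_go_lib (L : List String) :
    PySem.Str.join "\n" ("import (" :: (L ++ [")"])) =
      "import (\n" ++ (if L.isEmpty then "" else PySem.Str.join "\n" L ++ "\n") ++ ")" := by
  cases L with
  | nil => simp [pv_join_cons2, pv_join_singleton]
  | cons x xs =>
    rw [List.cons_append, pv_join_cons2, ← List.cons_append, pv_join_close]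
    simp [String.append_assoc]

-- ===== VERDICT (by name: the statement is the Claim_ definition above) =====
theorem update_script_info_spec : Claim_equal_update_script_info := by
  intro type liblist funclist classlist varlist _ hpre
  unfold Spec_update_script_info
  rcases hpre with h | h | h | h | h <;> subst h <;>
    simp [update_script_info, update_script_info_alt, pvFormatters,
      PySem.Dict.get?_mk_cons, pvCat_eq, pv_go_lib, List.isEmpty_iff]
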